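-- pv_equiv track=rewrite | github.com/LAD021/ci2n_datasets | validation/utils_ged.py | ports_in_order
-- ===== SOURCE A (Python) =====
-- def ports_in_order(component_type, port_connection):
--     # 定义不同component_type对应的端口顺序
--     order_map = {
--         'PMOS': ['Drain', 'Gate', 'Source'],
--         'NMOS': ['Drain', 'Gate', 'Source'],
--         'PNP': ['Collector', 'Base', 'Emitter'],
--         'NPN': ['Collector', 'Base', 'Emitter'],
--         'Res': ['Pos', 'Neg'],
--         'Cap': ['Pos', 'Neg'],
--         'Ind': ['Pos', 'Neg'],
--         'Switch': ['Pos', 'Neg'],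
--         'Diode': ['In', 'Out'],
--         'Current': ['In', 'Out'],
--         'Voltage': ['Positive', 'Negative'],
--         'Diso_amp': ['InP', 'InN', 'Out'],
--         'Dido_amp': ['InP', 'InN', 'OutP', 'OutN'],
--         'Siso_amp': ['In', 'Out']
--     }
--
--     # 获取当前component_type的顺序，如果不在order_map中，使用原始顺序
--     order = order_map.get(component_type, [])
--
--     # 建立新的有序字典
--     ordered_ports = {key: port_connection[key] for key in order if key in port_connection}
--
--     # 如果存在body-bodyvalue，将其放入最后
--     if 'Body' in port_connection:
--         ordered_ports['Body'] = port_connection['Body']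
--
--     return ordered_ports
-- ===== SOURCE B (Python) =====
-- def _order_of(component_type):
--     # grouped if-chain instead of a literal dict: several types share one order
--     if component_type in ('PMOS', 'NMOS'):
--         return ['Drain', 'Gate', 'Source']
--     if component_type in ('PNP', 'NPN'):
--         return ['Collector', 'Base', 'Emitter']
--     if component_type in ('Res', 'Cap', 'Ind', 'Switch'):
--         return ['Pos', 'Neg']
--     if component_type in ('Diode', 'Current', 'Siso_amp'):
--         return ['In', 'Out']
--     if component_type == 'Voltage':
--         return ['Positive', 'Negative']
--     if component_type == 'Diso_amp':
--         return ['InP', 'InN', 'Out']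
--     if component_type == 'Dido_amp':
--         return ['InP', 'InN', 'OutP', 'OutN']
--     return []
--
--
-- def ports_in_order(component_type, port_connection):
--     order = _order_of(component_type)
--     rank = {name: i for i, name in enumerate(order)}
--     # keep the recognised ports of the input, then sort them by their rank
--     kept = [(k, v) for k, v in port_connection.items() if k in rank]
--     kept.sort(key=lambda kv: rank[kv[0]])
--     # 'Body' goes last when present ('Body' is never a ranked port name)
--     if 'Body' in port_connection:
--         kept.append(('Body', port_connection['Body']))
--     return dict(kept)
-- ===== Notes on version B (the rewrite author's own statement) =====
-- stated objective: alternative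
-- what changed: A loops over the fixed order list probing the dict and inserting into a result dict; B stores the orders as a grouped if-chain, builds a name->rank index, filters the input's items in one pass, stably sorts the kept pairs by rank, appends Body as a pair and builds the result dict once from that list; Pre_ only excludes association lists with duplicate keys, which do not represent any Python dict.
import Mathlib
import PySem

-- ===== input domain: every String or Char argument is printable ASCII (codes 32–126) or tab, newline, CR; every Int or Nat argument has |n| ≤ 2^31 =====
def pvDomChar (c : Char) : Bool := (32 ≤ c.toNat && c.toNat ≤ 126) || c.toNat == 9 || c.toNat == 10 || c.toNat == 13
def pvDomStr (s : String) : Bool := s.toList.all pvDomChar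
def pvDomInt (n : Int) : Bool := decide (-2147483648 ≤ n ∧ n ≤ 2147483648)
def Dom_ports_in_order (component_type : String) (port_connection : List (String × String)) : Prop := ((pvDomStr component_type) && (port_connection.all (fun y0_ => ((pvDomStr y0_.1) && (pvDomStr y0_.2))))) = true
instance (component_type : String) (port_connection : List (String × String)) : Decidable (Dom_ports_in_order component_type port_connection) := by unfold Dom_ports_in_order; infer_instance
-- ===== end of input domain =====

-- B replaces A's probe-the-dict-for-each-order-name loop by a grouped if-chain order
-- table plus one filtering pass over the input's items, a stable sort by rank and a
-- single dict() construction (alternative decomposition, similar cost).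


-- ===== PORT A =====
def pvOrderMap : PySem.Dict String (List String) := PySem.Dict.mk
  [ ("PMOS", ["Drain", "Gate", "Source"]),
    ("NMOS", ["Drain", "Gate", "Source"]),
    ("PNP", ["Collector", "Base", "Emitter"]),
    ("NPN", ["Collector", "Base", "Emitter"]),
    ("Res", ["Pos", "Neg"]),
    ("Cap", ["Pos", "Neg"]),
    ("Ind", ["Pos", "Neg"]),
    ("Switch", ["Pos", "Neg"]),
    ("Diode", ["In", "Out"]),
    ("Current", ["In", "Out"]),
    ("Voltage", ["Positive", "Negative"]),
    ("Diso_amp", ["InP", "InN", "Out"]),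
    ("Dido_amp", ["InP", "InN", "OutP", "OutN"]),
    ("Siso_amp", ["In", "Out"]) ]

def ports_in_order (component_type : String) (port_connection : List (String × String)) : List (String × String) :=
  let d : PySem.Dict String String := PySem.Dict.mk port_connection
  let order := pvOrderMap.getD component_type []
  -- {key: port_connection[key] for key in order if key in port_connection}
  -- ('key in port_connection' then 'port_connection[key]' is exactly 'get? = some v')
  let ordered := order.foldl (fun acc key =>
      match d.get? key with
      | some v => acc.insert key v
      | none => acc) PySem.Dict.empty
  -- if 'Body' in port_connection: ordered['Body'] = port_connection['Body']
  let ordered := match d.get? "Body" with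
      | some v => ordered.insert "Body" v
      | none => ordered
  ordered.items

-- ===== PORT B =====
-- _order_of: the grouped if-chain of Source B ('in (t1, t2)' is the disjunction of equalities)
def pvOrderOf (component_type : String) : List String :=
  if component_type == "PMOS" || component_type == "NMOS" then ["Drain", "Gate", "Source"]
  else if component_type == "PNP" || component_type == "NPN" then ["Collector", "Base", "Emitter"]
  else if component_type == "Res" || component_type == "Cap" || component_type == "Ind" || component_type == "Switch" then ["Pos", "Neg"]
  else if component_type == "Diode" || component_type == "Current" || component_type == "Siso_amp" then ["In", "Out"]
  else if component_type == "Voltage" then ["Positive", "Negative"]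
  else if component_type == "Diso_amp" then ["InP", "InN", "Out"]
  else if component_type == "Dido_amp" then ["InP", "InN", "OutP", "OutN"]
  else []

def ports_in_order_alt (component_type : String) (port_connection : List (String × String)) : List (String × String) :=
  let order := pvOrderOf component_type
  -- rank = {name: i for i, name in enumerate(order)}
  let rank : PySem.Dict String Int :=
    (PySem.List.enumerate order).foldl (fun a p => a.insert p.2 p.1) PySem.Dict.empty
  let d : PySem.Dict String String := PySem.Dict.mk port_connection
  -- kept = [(k, v) for k, v in port_connection.items() if k in rank]
  let kept := d.items.filter (fun kv => rank.contains kv.1)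
  -- kept.sort(key=lambda kv: rank[kv[0]])  (kv[0] in rank by the filter, so getD is exact)
  let kept := PySem.List.sorted kept (fun kv => rank.getD kv.1 0)
  -- if 'Body' in port_connection: kept.append(('Body', port_connection['Body']))
  let kept := match d.get? "Body" with
      | some v => kept ++ [("Body", v)]
      | none => kept
  -- return dict(kept)
  (PySem.Dict.ofList kept).items

-- ===== PRECONDITION & SPEC =====
-- Pre_ excludes association lists with a duplicated key: they do not represent any Python
-- dict (the Python argument is a dict, whose keys are unique), so no behaviour of A is
-- specified on them.
def Pre_ports_in_order (_component_type : String) (port_connection : List (String × String)) : Prop :=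
  (port_connection.map Prod.fst).Nodup
instance (component_type : String) (port_connection : List (String × String)) : Decidable (Pre_ports_in_order component_type port_connection) := by unfold Pre_ports_in_order; infer_instance
def pvWitness_ports_in_order : String × (List (String × String)) :=
  ("NMOS", [("Gate", "n1"), ("Body", "n0"), ("Drain", "n2")])

def Spec_ports_in_order (component_type : String) (port_connection : List (String × String)) (out : List (String × String)) : Prop := out = ports_in_order_alt component_type port_connection
instance (component_type : String) (port_connection : List (String × String)) (out : List (String × String)) : Decidable (Spec_ports_in_order component_type port_connection out) := by unfold Spec_ports_in_order; infer_instance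

-- ===== CLAIM (what is proved, stated in full; the proofs are below) =====
def Claim_equal_ports_in_order : Prop := ∀ (component_type : String) (port_connection : List (String × String)), Dom_ports_in_order component_type port_connection → Pre_ports_in_order component_type port_connection → Spec_ports_in_order component_type port_connection (ports_in_order component_type port_connection)

-- ===== LEMMAS AND PROOFS =====

-- A's table lookup and B's if-chain select the same order list
lemma pv_order_eq (ct : String) : pvOrderMap.getD ct [] = pvOrderOf ct := by
  by_cases h1 : ct = "PMOS"; · subst h1; decide
  by_cases h2 : ct = "NMOS"; · subst h2; decide
  by_cases h3 : ct = "PNP"; · subst h3; decide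
  by_cases h4 : ct = "NPN"; · subst h4; decide
  by_cases h5 : ct = "Res"; · subst h5; decide
  by_cases h6 : ct = "Cap"; · subst h6; decide
  by_cases h7 : ct = "Ind"; · subst h7; decide
  by_cases h8 : ct = "Switch"; · subst h8; decide
  by_cases h9 : ct = "Diode"; · subst h9; decide
  by_cases h10 : ct = "Current"; · subst h10; decide
  by_cases h11 : ct = "Voltage"; · subst h11; decide
  by_cases h12 : ct = "Diso_amp"; · subst h12; decide
  by_cases h13 : ct = "Dido_amp"; · subst h13; decide
  by_cases h14 : ct = "Siso_amp"; · subst h14; decide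
  have e1 : ("PMOS" == ct) = false := beq_eq_false_iff_ne.mpr (Ne.symm h1)
  have e2 : ("NMOS" == ct) = false := beq_eq_false_iff_ne.mpr (Ne.symm h2)
  have e3 : ("PNP" == ct) = false := beq_eq_false_iff_ne.mpr (Ne.symm h3)
  have e4 : ("NPN" == ct) = false := beq_eq_false_iff_ne.mpr (Ne.symm h4)
  have e5 : ("Res" == ct) = false := beq_eq_false_iff_ne.mpr (Ne.symm h5)
  have e6 : ("Cap" == ct) = false := beq_eq_false_iff_ne.mpr (Ne.symm h6)
  have e7 : ("Ind" == ct) = false := beq_eq_false_iff_ne.mpr (Ne.symm h7)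
  have e8 : ("Switch" == ct) = false := beq_eq_false_iff_ne.mpr (Ne.symm h8)
  have e9 : ("Diode" == ct) = false := beq_eq_false_iff_ne.mpr (Ne.symm h9)
  have e10 : ("Current" == ct) = false := beq_eq_false_iff_ne.mpr (Ne.symm h10)
  have e11 : ("Voltage" == ct) = false := beq_eq_false_iff_ne.mpr (Ne.symm h11)
  have e12 : ("Diso_amp" == ct) = false := beq_eq_false_iff_ne.mpr (Ne.symm h12)
  have e13 : ("Dido_amp" == ct) = false := beq_eq_false_iff_ne.mpr (Ne.symm h13)
  have e14 : ("Siso_amp" == ct) = false := beq_eq_false_iff_ne.mpr (Ne.symm h14)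
  have f1 : (ct == "PMOS") = false := beq_eq_false_iff_ne.mpr h1
  have f2 : (ct == "NMOS") = false := beq_eq_false_iff_ne.mpr h2
  have f3 : (ct == "PNP") = false := beq_eq_false_iff_ne.mpr h3
  have f4 : (ct == "NPN") = false := beq_eq_false_iff_ne.mpr h4
  have f5 : (ct == "Res") = false := beq_eq_false_iff_ne.mpr h5
  have f6 : (ct == "Cap") = false := beq_eq_false_iff_ne.mpr h6
  have f7 : (ct == "Ind") = false := beq_eq_false_iff_ne.mpr h7
  have f8 : (ct == "Switch") = false := beq_eq_false_iff_ne.mpr h8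
  have f9 : (ct == "Diode") = false := beq_eq_false_iff_ne.mpr h9
  have f10 : (ct == "Current") = false := beq_eq_false_iff_ne.mpr h10
  have f11 : (ct == "Voltage") = false := beq_eq_false_iff_ne.mpr h11
  have f12 : (ct == "Diso_amp") = false := beq_eq_false_iff_ne.mpr h12
  have f13 : (ct == "Dido_amp") = false := beq_eq_false_iff_ne.mpr h13
  have f14 : (ct == "Siso_amp") = false := beq_eq_false_iff_ne.mpr h14
  simp only [pvOrderMap, pvOrderOf, PySem.Dict.getD, PySem.Dict.get?, List.find?_cons,
    e1, e2, e3, e4, e5, e6, e7, e8, e9, e10, e11, e12, e13, e14,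
    f1, f2, f3, f4, f5, f6, f7, f8, f9, f10, f11, f12, f13, f14,
    Bool.or_self, if_false, Bool.false_eq_true, List.find?_nil,
    Option.map_none, Option.getD_none]

-- every order list is duplicate-free and never contains "Body"
lemma pv_order_nodup (ct : String) : (pvOrderOf ct).Nodup := by
  unfold pvOrderOf; repeat' split
  all_goals decide

lemma pv_body_not_mem (ct : String) : "Body" ∉ pvOrderOf ct := by
  unfold pvOrderOf; repeat' split
  all_goals decide

-- the rank dict built from enumerate: lookup is the position in the list
lemma pv_rank_get? (k : String) : ∀ (l : List String) (s : Int) (acc : PySem.Dict String Int),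
    l.Nodup →
    ((PySem.List.enumerate l s).foldl (fun a p => a.insert p.2 p.1) acc).get? k =
      if k ∈ l then some (s + (l.idxOf k : Int)) else acc.get? k := by
  intro l
  induction l with
  | nil => intro s acc _; simp [PySem.List.enumerate]
  | cons x t ih =>
    intro s acc hnd
    rw [List.nodup_cons] at hnd
    simp only [PySem.List.enumerate, List.foldl_cons]
    by_cases hk : k = x
    · subst hk
      rw [ih _ _ hnd.2]
      simp [hnd.1, PySem.Dict.get?_insert_self, List.idxOf_cons_self]
    · rw [ih _ _ hnd.2]
      by_cases hmem : k ∈ t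
      · simp only [List.mem_cons, hmem, or_true, if_true, hk]
        have hxk : (x == k) = false := beq_eq_false_iff_ne.mpr (Ne.symm hk)
        have : (x :: t).idxOf k = t.idxOf k + 1 := by
          simp [List.idxOf_cons, hxk]
        rw [this]
        push_cast
        ring_nf
      · simp only [List.mem_cons, hk, hmem, or_self, if_false]
        rw [PySem.Dict.get?_insert_of_ne _ _ hk]

-- the guarded A-side fold over fresh duplicate-free keys appends its hits
lemma pv_fold_items (d : PySem.Dict String String) :
    ∀ (l : List String) (acc : PySem.Dict String String), l.Nodup →
    (∀ k ∈ l, acc.contains k = false) →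
    (l.foldl (fun acc k =>
        match d.get? k with
        | some v => acc.insert k v
        | none => acc) acc).items =
      acc.items ++ l.filterMap (fun k => (d.get? k).map (fun v => (k, v))) := by
  intro l
  induction l with
  | nil => intro acc _ _; simp
  | cons x t ih =>
    intro acc hnd hfresh
    rw [List.nodup_cons] at hnd
    simp only [List.foldl_cons, List.filterMap_cons]
    cases hg : d.get? x with
    | none =>
      simp only [Option.map_none]
      exact ih acc hnd.2 (fun k hk => hfresh k (List.mem_cons_of_mem _ hk))
    | some v =>
      simp only [Option.map_some]
      rw [ih (acc.insert x v) hnd.2 ?_ ]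
      · rw [PySem.Dict.items_insert_of_not_contains acc v (hfresh x (List.mem_cons_self))]
        simp
      · intro k hk
        rw [PySem.Dict.contains_insert]
        have hkx : k ≠ x := fun h => hnd.1 (h ▸ hk)
        simp [hkx, hfresh k (List.mem_cons_of_mem _ hk)]

-- the A-side fold leaves keys outside l untouched
lemma pv_fold_get?_of_not_mem (d : PySem.Dict String String) (k : String) :
    ∀ (l : List String) (acc : PySem.Dict String String), k ∉ l →
    (l.foldl (fun acc k' =>
        match d.get? k' with
        | some v => acc.insert k' v
        | none => acc) acc).get? k = acc.get? k := by
  intro l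
  induction l with
  | nil => intro acc _; rfl
  | cons x t ih =>
    intro acc hk
    simp only [List.foldl_cons]
    rw [ih _ (fun h => hk (List.mem_cons_of_mem _ h))]
    cases d.get? x with
    | none => rfl
    | some v =>
      exact PySem.Dict.get?_insert_of_ne _ _ (fun h => hk (h ▸ List.mem_cons_self))

-- a duplicate-free list is strictly increasing under its own idxOf
lemma pv_pairwise_idxOf (l : List String) (h : l.Nodup) :
    l.Pairwise (fun a b => l.idxOf a < l.idxOf b) := by
  rw [List.pairwise_iff_getElem]
  intro i j hi hj hij
  rw [h.idxOf_getElem i hi, h.idxOf_getElem j hj]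
  exact hij

-- keys of the order-filterMap: the order names whose lookup hits
lemma pv_filterMap_fst (d : PySem.Dict String String) : ∀ (l : List String),
    (l.filterMap (fun k => (d.get? k).map (fun v => (k, v)))).map Prod.fst =
      l.filter (fun k => (d.get? k).isSome) := by
  intro l
  induction l with
  | nil => rfl
  | cons x t ih =>
    simp only [List.filterMap_cons, List.filter_cons]
    cases hg : d.get? x with
    | none => simpa [hg] using ih
    | some v => simpa [hg] using ih

-- membership in the order-filterMap
lemma pv_mem_filterMap (d : PySem.Dict String String) (l : List String) (p : String × String) :
    p ∈ l.filterMap (fun k => (d.get? k).map (fun v => (k, v))) ↔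
      p.1 ∈ l ∧ d.get? p.1 = some p.2 := by
  rw [List.mem_filterMap]
  constructor
  · rintro ⟨k, hk, hf⟩
    cases hg : d.get? k with
    | none => rw [hg] at hf; simp at hf
    | some v =>
      rw [hg] at hf
      simp only [Option.map_some, Option.some.injEq] at hf
      rcases hf with rfl
      exact ⟨hk, hg⟩
  · rintro ⟨hk, hg⟩
    exact ⟨p.1, hk, by rw [hg]; rfl⟩

-- ===== VERDICT (by name: the statement is the Claim_ definition above) =====
theorem ports_in_order_spec : Claim_equal_ports_in_order := by
  intro ct pc _hdom hpre
  unfold Spec_ports_in_order ports_in_order ports_in_order_alt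
  dsimp only
  rw [pv_order_eq]
  set d : PySem.Dict String String := PySem.Dict.mk pc with hd
  set order := pvOrderOf ct with horder
  have hord : order.Nodup := pv_order_nodup ct
  have hbody : "Body" ∉ order := pv_body_not_mem ct
  have hkeys : d.keys.Nodup := by rw [hd, PySem.Dict.keys_mk]; exact hpre
  set rank : PySem.Dict String Int :=
    (PySem.List.enumerate order).foldl (fun a p => a.insert p.2 p.1) PySem.Dict.empty with hrank
  have hget : ∀ k, rank.get? k = if k ∈ order then some ((order.idxOf k : Int)) else none := by
    intro k
    rw [hrank, pv_rank_get? k order 0 PySem.Dict.empty hord]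
    simp [PySem.Dict.get?_empty]
  have hcont : ∀ k, rank.contains k = decide (k ∈ order) := by
    intro k
    rw [PySem.Dict.contains_eq_isSome_get?, hget k]
    by_cases h : k ∈ order <;> simp [h]
  set L := order.filterMap (fun k => (d.get? k).map (fun v => (k, v))) with hL
  -- key list of L
  have hLfst : L.map Prod.fst = order.filter (fun k => (d.get? k).isSome) :=
    pv_filterMap_fst d order
  have hLfstnd : (L.map Prod.fst).Nodup := by rw [hLfst]; exact hord.filter _
  have hLnd : L.Nodup := hLfstnd.of_map
  have hbodyL : "Body" ∉ L.map Prod.fst := by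
    rw [hLfst]; intro hmem
    exact hbody (List.mem_of_mem_filter hmem)
  -- A's first-phase fold
  have hA := pv_fold_items d order PySem.Dict.empty hord (fun k _ => PySem.Dict.contains_empty k)
  have hAbody : (order.foldl (fun acc k =>
      match d.get? k with
      | some v => acc.insert k v
      | none => acc) PySem.Dict.empty).contains "Body" = false := by
    rw [PySem.Dict.contains_eq_isSome_get?,
      pv_fold_get?_of_not_mem d "Body" order PySem.Dict.empty hbody]
    simp [PySem.Dict.get?_empty]
  -- B's sorted kept pairs are exactly L
  have hsorted : PySem.List.sorted (d.items.filter (fun kv => rank.contains kv.1))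
      (fun kv => rank.getD kv.1 0) = L := by
    apply PySem.List.sorted_eq_of_perm_of_pairwise_lt
    · -- L is a permutation of the filtered items
      have hitemsnd : d.items.Nodup := hkeys.of_map
      rw [List.perm_ext_iff_of_nodup hLnd (hitemsnd.filter _)]
      intro p
      rw [hL, pv_mem_filterMap, List.mem_filter, hcont]
      rw [← PySem.Dict.get?_eq_some_iff_mem_items d p.1 p.2 hkeys]
      simp only [decide_eq_true_eq]
      tauto
    · -- strictly increasing rank along L
      have hpw : L.Pairwise (fun a b => order.idxOf a.1 < order.idxOf b.1) := by
        have h1 : (L.map Prod.fst).Pairwise (fun a b => order.idxOf a < order.idxOf b) := by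
          rw [hLfst]
          exact (pv_pairwise_idxOf order hord).filter _
        exact List.Pairwise.of_map Prod.fst (fun a b h => h) h1
      refine hpw.imp_of_mem ?_
      intro a b ha hb hab
      have hao : a.1 ∈ order := ((pv_mem_filterMap d order a).mp (hL ▸ ha)).1
      have hbo : b.1 ∈ order := ((pv_mem_filterMap d order b).mp (hL ▸ hb)).1
      simp only [PySem.Dict.getD, hget, hao, hbo, if_true, Option.getD_some]
      exact_mod_cast hab
  rw [hsorted]
  -- dict(kept): with duplicate-free keys the constructed dict's items are the list itself
  have hofList : ∀ (l : List (String × String)), (l.map Prod.fst).Nodup →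
      (PySem.Dict.ofList l).items = l := by
    intro l hnd
    have h2 := PySem.Dict.items_foldl_insert_fresh l Prod.fst Prod.snd PySem.Dict.empty
      (fun a _ => PySem.Dict.contains_empty a.1) hnd
    simpa using h2
  -- both final phases: 'Body' appended last
  cases hg : d.get? "Body" with
  | none =>
    dsimp only
    rw [hA, hofList L hLfstnd]
    exact List.nil_append L
  | some v =>
    dsimp only
    rw [PySem.Dict.items_insert_of_not_contains _ v hAbody, hA,
      hofList (L ++ [("Body", v)]) (by
        simp only [List.map_append, List.map_cons, List.map_nil]
        refine (List.nodup_append).mpr ⟨hLfstnd, List.nodup_singleton _, ?_⟩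
        intro a ha b hb
        rw [List.mem_singleton] at hb
        subst hb
        exact fun h => hbodyL (h ▸ ha))]
    exact List.nil_append _
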